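-- pv_equiv track=rewrite | github.com/aaraney/NWM-Dockerized-Job-Scheduler | framework/perturbation_engine/parm_editor.py | _create_parameter_operator_dict
-- ===== SOURCE A (Python) =====
-- def _create_parameter_operator_dict(parameters, operators, values):
--     '''
--
--     Take a list of: parameters, operators, and values and return a dictionary
--     with keys=parameters and values a list of operator value tuples
--
--     '''
--
--     if not len(parameters) == len(operators) == len(values):
--         raise IndexError('Check that number of provided parameters, operators, and values equal the same length')
--
--     parameter_dict = {}
--
--     for index, parameter in enumerate(parameters):
--
--         # If parameter already key in dictionary, then append to the list of
--         # operator, value tuples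
--         if parameter in parameter_dict.keys():
--             parameter_dict[parameter].append( (operators[index], values[index]) )
--
--         else:
--             parameter_dict[parameter] = [ (operators[index], values[index]) ]
--
--     # Check to make sure dictionary isnt empty
--     if len(parameter_dict.keys()):
--         return parameter_dict
--
--     else:
--         raise KeyError('There were no parameter, operator, value pairs provided')
-- ===== SOURCE B (Python) =====
-- def _create_parameter_operator_dict(parameters, operators, values):
--     '''Group-by re-implementation: distinct parameters first, then one filtered
--     scan per distinct parameter (instead of a streaming append loop).'''
--
--     if not len(parameters) == len(operators) == len(values):
--         raise IndexError('Check that number of provided parameters, operators, and values equal the same length')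
--
--     pairs = list(zip(operators, values))
--
--     result = {p: [pr for q, pr in zip(parameters, pairs) if q == p]
--               for p in dict.fromkeys(parameters)}
--
--     if not result:
--         raise KeyError('There were no parameter, operator, value pairs provided')
--
--     return result
-- ===== Notes on version B (the rewrite author's own statement) =====
-- stated objective: alternative
-- what changed: Replaces the single streaming dict-append loop with a group-by: compute the distinct parameters first (dict.fromkeys) and then build each key's list by one filtered scan over the zipped (parameter, (operator, value)) pairs.
import Mathlib
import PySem

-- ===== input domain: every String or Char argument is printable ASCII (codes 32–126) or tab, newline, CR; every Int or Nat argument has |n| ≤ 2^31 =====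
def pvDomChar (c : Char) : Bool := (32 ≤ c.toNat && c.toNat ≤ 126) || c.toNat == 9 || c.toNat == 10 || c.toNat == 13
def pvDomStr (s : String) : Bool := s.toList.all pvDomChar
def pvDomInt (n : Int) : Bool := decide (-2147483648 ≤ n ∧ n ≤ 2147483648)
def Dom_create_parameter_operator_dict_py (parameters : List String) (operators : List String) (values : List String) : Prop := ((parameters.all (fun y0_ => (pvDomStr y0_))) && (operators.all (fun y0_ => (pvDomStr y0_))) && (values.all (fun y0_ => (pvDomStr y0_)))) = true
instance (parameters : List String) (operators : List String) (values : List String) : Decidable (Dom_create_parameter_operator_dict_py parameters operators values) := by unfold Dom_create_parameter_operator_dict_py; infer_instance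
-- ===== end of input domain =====

-- B replaces A's streaming dict-append loop by a group-by (distinct parameters first,
-- then one filtered scan of the zipped pairs per distinct parameter): same values, no speed claim.


-- ===== PORT A =====
-- Literal port of A: length guard (IndexError → [] , excluded by Pre_), then the
-- enumerate loop appending (operators[index], values[index]) per parameter into an
-- insertion-ordered dict, then the empty check (KeyError → [] , excluded by Pre_).
-- The '.getD ""' after pyGet? is never reached: after the guard every index of the
-- enumeration is in range of operators/values.
def create_parameter_operator_dict_py (parameters : List String) (operators : List String) (values : List String) : List (String × List (String × String)) :=
  if parameters.length == operators.length && operators.length == values.length then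
    let parameter_dict :=
      (PySem.List.enumerate parameters).foldl
        (fun d iq =>
          if d.contains iq.2 then
            d.modify iq.2 [] (fun l => l ++ [((PySem.List.pyGet? operators iq.1).getD "", (PySem.List.pyGet? values iq.1).getD "")])
          else
            d.insert iq.2 [((PySem.List.pyGet? operators iq.1).getD "", (PySem.List.pyGet? values iq.1).getD "")])
        PySem.Dict.empty
    if parameter_dict.keys.length ≠ 0 then parameter_dict.items else []
  else []

-- ===== PORT B =====
-- Literal port of B: same guard, zip the pairs, distinct parameters via dict.fromkeys
-- (= PySem.List.dedup), one filtered scan per distinct parameter, empty check.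
def create_parameter_operator_dict_py_alt (parameters : List String) (operators : List String) (values : List String) : List (String × List (String × String)) :=
  if parameters.length == operators.length && operators.length == values.length then
    let pairs := operators.zip values
    let result :=
      (PySem.List.dedup parameters).map
        (fun p => (p, ((parameters.zip pairs).filter (fun q => q.1 == p)).map (fun q => q.2)))
    if result.isEmpty then [] else result
  else []

-- ===== PRECONDITION & SPEC =====
-- Pre_ excludes exactly the inputs where the Python A raises: mismatched lengths
-- (IndexError) and an empty parameter list (KeyError).
def Pre_create_parameter_operator_dict_py (parameters : List String) (operators : List String) (values : List String) : Prop :=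
  parameters.length = operators.length ∧ operators.length = values.length ∧ parameters ≠ []
instance (parameters : List String) (operators : List String) (values : List String) : Decidable (Pre_create_parameter_operator_dict_py parameters operators values) := by unfold Pre_create_parameter_operator_dict_py; infer_instance

def pvWitness_create_parameter_operator_dict_py : List String × List String × List String :=
  (["a", "b", "a"], ["<", ">", "="], ["1", "2", "3"])

def Spec_create_parameter_operator_dict_py (parameters : List String) (operators : List String) (values : List String) (out : List (String × List (String × String))) : Prop := out = create_parameter_operator_dict_py_alt parameters operators values
instance (parameters : List String) (operators : List String) (values : List String) (out : List (String × List (String × String))) : Decidable (Spec_create_parameter_operator_dict_py parameters operators values out) := by unfold Spec_create_parameter_operator_dict_py; infer_instance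

-- ===== CLAIM (what is proved, stated in full; the proofs are below) =====
def Claim_equal_create_parameter_operator_dict_py : Prop := ∀ (parameters : List String) (operators : List String) (values : List String), Dom_create_parameter_operator_dict_py parameters operators values → Pre_create_parameter_operator_dict_py parameters operators values → Spec_create_parameter_operator_dict_py parameters operators values (create_parameter_operator_dict_py parameters operators values)

-- ===== LEMMAS AND PROOFS =====

-- A's loop body (if contains then append else insert-singleton) is exactly Dict.modify.
theorem pv_step_eq_modify (d : PySem.Dict String (List (String × String))) (p : String) (x : String × String) :
    (if d.contains p then d.modify p [] (fun l => l ++ [x]) else d.insert p [x])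
      = d.modify p [] (fun l => l ++ [x]) := by
  by_cases h : d.contains p = true
  · simp [h]
  · have hg : d.getD p [] = [] :=
      PySem.Dict.getD_of_not_contains (k := p) d [] (by simpa using h)
    simp [h, PySem.Dict.modify, hg]

-- A's enumerate-and-index fold equals the modify fold over the zipped triple.
theorem pv_fold_enum_eq_fold_zip (operators values : List String) :
    ∀ (ps : List String) (s : Nat) (d : PySem.Dict String (List (String × String))),
      s + ps.length = operators.length → operators.length = values.length →
      (PySem.List.enumerate ps (s : Int)).foldl
          (fun d iq =>
            if d.contains iq.2 then
              d.modify iq.2 [] (fun l => l ++ [((PySem.List.pyGet? operators iq.1).getD "", (PySem.List.pyGet? values iq.1).getD "")])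
            else
              d.insert iq.2 [((PySem.List.pyGet? operators iq.1).getD "", (PySem.List.pyGet? values iq.1).getD "")]) d
        = (ps.zip ((operators.drop s).zip (values.drop s))).foldl
            (fun d q => d.modify q.1 [] (fun l => l ++ [q.2])) d := by
  intro ps
  induction ps with
  | nil => intro s d _ _; simp [PySem.List.enumerate_nil]
  | cons p rest ih =>
    intro s d hlen hov
    have hs : s < operators.length := by simp at hlen; omega
    have hsv : s < values.length := by omega
    rw [PySem.List.enumerate_cons]
    rw [List.drop_eq_getElem_cons hs, List.drop_eq_getElem_cons hsv]
    simp only [List.zip_cons_cons, List.foldl_cons]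
    rw [pv_step_eq_modify]
    have h1 : PySem.List.pyGet? operators ((s : Nat) : Int) = some operators[s] := by
      simp [PySem.List.pyGet?_natCast, List.getElem?_eq_getElem hs]
    have h2 : PySem.List.pyGet? values ((s : Nat) : Int) = some values[s] := by
      simp [PySem.List.pyGet?_natCast, List.getElem?_eq_getElem hsv]
    rw [h1, h2]
    simp only [Option.getD_some]
    have hcast : ((s : Int) + 1) = (((s + 1 : Nat)) : Int) := by push_cast; ring
    rw [hcast, ih (s + 1) _ (by simp at hlen ⊢; omega) hov]

theorem pv_ofList_ne_nil {xs : List String} (h : xs ≠ []) : PySem.Set.ofList xs ≠ [] := by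
  intro hnil
  match xs, h with
  | x :: rest, _ =>
    have : x ∈ PySem.Set.ofList (x :: rest) := by
      rw [PySem.Set.mem_ofList]; exact List.mem_cons_self
    rw [hnil] at this; exact absurd this (List.not_mem_nil)

-- ===== VERDICT (by name: the statement is the Claim_ definition above) =====
theorem create_parameter_operator_dict_py_spec : Claim_equal_create_parameter_operator_dict_py := by
  intro parameters operators values _ hpre
  obtain ⟨h1, h2, hne⟩ := hpre
  unfold Spec_create_parameter_operator_dict_py
  unfold create_parameter_operator_dict_py create_parameter_operator_dict_py_alt
  simp only [h1, h2, beq_self_eq_true, Bool.and_self, if_true]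
  have hfold := pv_fold_enum_eq_fold_zip operators values parameters 0
      PySem.Dict.empty (by omega) h2
  simp only [List.drop_zero, Nat.cast_zero] at hfold
  rw [hfold]
  set l := parameters.zip (operators.zip values) with hl
  set D := l.foldl (fun d q => d.modify q.1 [] (fun l => l ++ [q.2])) PySem.Dict.empty with hD
  have hkeys : D.keys = PySem.Set.ofList parameters := by
    rw [hD, PySem.Dict.keys_foldl_modify_key l (fun q => q.1) [] (fun _ q => (fun ll => ll ++ [q.2]))]
    have : l.map (fun q => q.1) = parameters := by
      rw [hl]; exact List.map_fst_zip (by simp; omega)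
    rw [this]
    rfl
  have hnodup : D.keys.Nodup := by
    rw [hkeys]; exact PySem.Set.nodup_ofList parameters
  have hitems : D.items = (PySem.List.dedup parameters).map
      (fun p => (p, (l.filter (fun q => q.1 == p)).map (fun q => q.2))) := by
    rw [PySem.Dict.items_eq_map_keys D hnodup [], hkeys, PySem.List.dedup_eq_ofList]
    apply List.map_congr_left
    intro k _
    rw [hD, PySem.Dict.getD_foldl_modify_append l PySem.Dict.empty k]
    simp [PySem.Dict.getD_empty]
  have hne' : PySem.Set.ofList parameters ≠ [] := pv_ofList_ne_nil hne
  have hklen : D.keys.length ≠ 0 := by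
    rw [hkeys]; simpa [List.length_eq_zero_iff] using hne'
  have hres : ((PySem.List.dedup parameters).map
      (fun p => (p, (l.filter (fun q => q.1 == p)).map (fun q => q.2)))).isEmpty = false := by
    simp [PySem.List.dedup_eq_ofList, hne']
  simp only [hklen, hres, Bool.false_eq_true, if_false, ite_not, hitems]
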